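-- pv_equiv track=rewrite | github.com/kaiser-data/carlover | app/services/car_detection.py | _parse_brand_model
-- ===== SOURCE A (Python) =====
-- _MULTI_WORD_BRANDS = {
--     "Alfa Romeo",
--     "Aston Martin",
--     "Land Rover",
--     "Mercedes-Benz",
--     "Rolls-Royce",
-- }
--
-- def _parse_brand_model(label: str) -> tuple[str, str]:
--     """Split a dima806 label like 'Volkswagen Beetle' into (make, model)."""
--     label = label.strip()
--     for brand in _MULTI_WORD_BRANDS:
--         if label.startswith(brand + " "):
--             return brand, label[len(brand) + 1 :].strip()
--     parts = label.split(" ", 1)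
--     if len(parts) == 2:
--         return parts[0], parts[1]
--     return label, ""
-- ===== SOURCE B (Python) =====
-- _TWO_WORD_BRANDS = {"Alfa Romeo", "Aston Martin", "Land Rover"}
-- _ONE_TOKEN_BRANDS = {"Mercedes-Benz", "Rolls-Royce"}
--
-- def _parse_brand_model(label: str) -> tuple[str, str]:
--     """Split a dima806 label like 'Volkswagen Beetle' into (make, model)."""
--     label = label.strip()
--     make, sep, rest = label.partition(" ")
--     if not sep:
--         return label, ""
--     if make in _ONE_TOKEN_BRANDS:
--         return make, rest.strip()
--     word2, sep2, rest2 = rest.partition(" ")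
--     if sep2 and make + " " + word2 in _TWO_WORD_BRANDS:
--         return make + " " + word2, rest2.strip()
--     return make, rest
-- ===== Notes on version B (the rewrite author's own statement) =====
-- stated objective: simpler
-- what changed: Replaced A's loop of startswith tests over the five-brand set by two partitions of the label at its first spaces plus set-membership tests of the one-token make and of the reconstructed two-word candidate, so no per-brand scan remains.
import Mathlib
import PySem

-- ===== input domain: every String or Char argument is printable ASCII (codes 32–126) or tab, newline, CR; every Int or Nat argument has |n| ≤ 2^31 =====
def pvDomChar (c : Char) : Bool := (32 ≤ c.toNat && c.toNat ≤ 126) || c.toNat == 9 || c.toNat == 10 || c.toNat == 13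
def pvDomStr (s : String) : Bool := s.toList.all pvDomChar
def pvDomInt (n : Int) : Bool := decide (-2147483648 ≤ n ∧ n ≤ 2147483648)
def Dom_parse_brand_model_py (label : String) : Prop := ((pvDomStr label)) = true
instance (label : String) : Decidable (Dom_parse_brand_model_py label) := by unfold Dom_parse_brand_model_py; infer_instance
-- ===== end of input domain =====

-- B replaces A's per-brand startswith scan by two partitions at the first spaces plus set-membership
-- tests of the candidate make tokens (objective: simpler; return value only, no side effects).

-- ===== PORT A =====
-- _MULTI_WORD_BRANDS as a list of char lists; Python set iteration order is immaterial here: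
-- the brands' first tokens are pairwise distinct, so at most one brand can match a given label.
def pyBrandsA : List (List Char) :=
  ["Alfa Romeo".toList, "Aston Martin".toList, "Land Rover".toList,
   "Mercedes-Benz".toList, "Rolls-Royce".toList]

-- the 'for brand in _MULTI_WORD_BRANDS' loop; after it, 'label.split(" ", 1)' and the len test
def parseLoopA (cs : List Char) : List (List Char) → List Char × List Char
  | [] =>
    match PySem.Chars.splitOnMax cs [' '] 1 with
    | [p0, p1] => (p0, p1)        -- len(parts) == 2
    | _ => (cs, [])               -- return label, ""
  | b :: rest =>
    if PySem.Chars.startswith cs (b ++ [' ']) then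
      (b, PySem.Chars.strip (PySem.List.slice cs (some ((b.length : Int) + 1)) none))
    else parseLoopA cs rest

def parse_brand_model_py (label : String) : String × String :=
  let cs := PySem.Chars.strip label.toList     -- label = label.strip()
  let p := parseLoopA cs pyBrandsA
  (String.ofList p.1, String.ofList p.2)

-- ===== PORT B =====
def twoWordBrands : List (List Char) :=
  ["Alfa Romeo".toList, "Aston Martin".toList, "Land Rover".toList]
def oneTokenBrands : List (List Char) :=
  ["Mercedes-Benz".toList, "Rolls-Royce".toList]

-- hand port of str.partition(" ") (no PySem primitive); exact for the one-character separator " "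
def partSp (cs : List Char) : List Char × Bool × List Char :=
  let head := cs.takeWhile (· != ' ')
  match cs.dropWhile (· != ' ') with
  | [] => (head, false, [])
  | _ :: tail => (head, true, tail)

def altCore (cs : List Char) : List Char × List Char :=
  let p1 := partSp cs                                   -- make, sep, rest = label.partition(" ")
  let make := p1.1
  let rest := p1.2.2
  if p1.2.1 = false then (cs, [])                       -- if not sep: return label, ""
  else if make ∈ oneTokenBrands then (make, PySem.Chars.strip rest)
  else
    let p2 := partSp rest                               -- word2, sep2, rest2 = rest.partition(" ")
    let cand := make ++ ' ' :: p2.1                     -- make + " " + word2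
    if p2.2.1 = true ∧ cand ∈ twoWordBrands then (cand, PySem.Chars.strip p2.2.2)
    else (make, rest)

def parse_brand_model_py_alt (label : String) : String × String :=
  let p := altCore (PySem.Chars.strip label.toList)    -- label = label.strip()
  (String.ofList p.1, String.ofList p.2)

-- ===== PRECONDITION & SPEC =====
def Spec_parse_brand_model_py (label : String) (out : String × String) : Prop := out = parse_brand_model_py_alt label
instance (label : String) (out : String × String) : Decidable (Spec_parse_brand_model_py label out) := by unfold Spec_parse_brand_model_py; infer_instance

-- ===== CLAIM (what is proved, stated in full; the proofs are below) =====
def Claim_equal_parse_brand_model_py : Prop := ∀ (label : String), Dom_parse_brand_model_py label → Spec_parse_brand_model_py label (parse_brand_model_py label)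

-- ===== LEMMAS AND PROOFS =====

-- takeWhile (· != ' ') reads exactly the first space-free token
theorem tw_word (b x : List Char) (hb : ' ' ∉ b) :
    (b ++ ' ' :: x).takeWhile (· != ' ') = b := by
  induction b with
  | nil => simp
  | cons c cb ih =>
    have hc : c ≠ ' ' := fun h => hb (h ▸ List.mem_cons_self)
    simp only [List.cons_append, List.takeWhile_cons]
    simp [hc, ih (fun h => hb (List.mem_cons_of_mem _ h))]

theorem dw_word (b x : List Char) (hb : ' ' ∉ b) :
    (b ++ ' ' :: x).dropWhile (· != ' ') = ' ' :: x := by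
  induction b with
  | nil => simp
  | cons c cb ih =>
    have hc : c ≠ ' ' := fun h => hb (h ▸ List.mem_cons_self)
    simp only [List.cons_append, List.dropWhile_cons]
    simp [hc, ih (fun h => hb (List.mem_cons_of_mem _ h))]

-- a word-space-tail decomposition is unique when the words are space-free
theorem word_inj (a b x y : List Char) (ha : ' ' ∉ a) (hb : ' ' ∉ b) :
    a ++ ' ' :: x = b ++ ' ' :: y ↔ a = b ∧ x = y := by
  constructor
  · intro h
    have hab : a = b := by
      have := congrArg (List.takeWhile (· != ' ')) h
      rwa [tw_word a x ha, tw_word b y hb] at this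
    subst hab
    exact ⟨rfl, by simpa using List.append_cancel_left h⟩
  · rintro ⟨rfl, rfl⟩; rfl

theorem pfx_iff (b w t : List Char) (hb : ' ' ∉ b) (hw : ' ' ∉ w) :
    (b ++ [' ']) <+: (w ++ ' ' :: t) ↔ b = w := by
  constructor
  · rintro ⟨r, h⟩
    rw [show (b ++ [' ']) ++ r = b ++ ' ' :: r by simp] at h
    exact ((word_inj b w r t hb hw).1 h).1
  · rintro rfl
    exact ⟨t, by simp⟩

theorem pfx2_iff (u v w t : List Char) (hu : ' ' ∉ u) (hw : ' ' ∉ w) :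
    (u ++ ' ' :: (v ++ [' '])) <+: (w ++ ' ' :: t) ↔ u = w ∧ (v ++ [' ']) <+: t := by
  constructor
  · rintro ⟨r, h⟩
    rw [show (u ++ ' ' :: (v ++ [' '])) ++ r = u ++ ' ' :: ((v ++ [' ']) ++ r) by simp] at h
    have := (word_inj u w ((v ++ [' ']) ++ r) t hu hw).1 h
    exact ⟨this.1, r, this.2⟩
  · rintro ⟨rfl, r, rfl⟩
    exact ⟨r, by simp⟩

-- a prefix ending in ' ' forces a space in the string
theorem pfx_space (b cs : List Char) (h : (b ++ [' ']) <+: cs) : ' ' ∈ cs :=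
  h.subset (by simp)

-- splitOnMax.go lemmas for sep = [' '], maxsplit 1
theorem go_zero (t cur : List Char) (acc : List (List Char)) (fuel : Nat) (hf : 0 < fuel) :
    PySem.Chars.splitOnMax.go [' '] fuel 0 t cur acc = ((cur.reverse ++ t) :: acc).reverse := by
  cases fuel with
  | zero => omega
  | succ f =>
    cases t with
    | nil => simp [PySem.Chars.splitOnMax.go]
    | cons c t' => simp [PySem.Chars.splitOnMax.go]

theorem go_nospace (l : List Char) (fuel : Nat) (hf : l.length < fuel)
    (hl : ∀ c ∈ l, c ≠ ' ') (cur : List Char) (acc : List (List Char)) :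
    PySem.Chars.splitOnMax.go [' '] fuel 1 l cur acc = ((cur.reverse ++ l) :: acc).reverse := by
  induction l generalizing fuel cur acc with
  | nil =>
    cases fuel with
    | zero => omega
    | succ f => simp [PySem.Chars.splitOnMax.go]
  | cons c l' ih =>
    cases fuel with
    | zero => omega
    | succ f =>
      have hc : c ≠ ' ' := hl c List.mem_cons_self
      have : PySem.Chars.splitOnMax.go [' '] (f+1) 1 (c :: l') cur acc
           = PySem.Chars.splitOnMax.go [' '] f 1 l' (c :: cur) acc := by
        simp [PySem.Chars.splitOnMax.go, List.isPrefixOf, Ne.symm hc]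
      rw [this, ih f (by simpa using Nat.lt_of_succ_lt_succ hf)
            (fun c h => hl c (List.mem_cons_of_mem _ h)) (c :: cur) acc]
      simp

theorem go_space (w : List Char) (t : List Char) (fuel : Nat)
    (hf : w.length + t.length + 1 < fuel) (hw : ∀ c ∈ w, c ≠ ' ')
    (cur : List Char) (acc : List (List Char)) :
    PySem.Chars.splitOnMax.go [' '] fuel 1 (w ++ ' ' :: t) cur acc
      = (t :: (cur.reverse ++ w) :: acc).reverse := by
  induction w generalizing fuel cur with
  | nil =>
    cases fuel with
    | zero => omega
    | succ f =>
      have : PySem.Chars.splitOnMax.go [' '] (f+1) 1 ([] ++ ' ' :: t) cur acc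
           = PySem.Chars.splitOnMax.go [' '] f 0 t [] (cur.reverse :: acc) := by
        simp [PySem.Chars.splitOnMax.go, List.isPrefixOf]
      rw [this, go_zero t [] (cur.reverse :: acc) f (by simp at hf; omega)]
      simp
  | cons c w' ih =>
    cases fuel with
    | zero => omega
    | succ f =>
      have hc : c ≠ ' ' := hw c List.mem_cons_self
      have : PySem.Chars.splitOnMax.go [' '] (f+1) 1 ((c :: w') ++ ' ' :: t) cur acc
           = PySem.Chars.splitOnMax.go [' '] f 1 (w' ++ ' ' :: t) (c :: cur) acc := by
        simp [PySem.Chars.splitOnMax.go, List.isPrefixOf, Ne.symm hc]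
      rw [this, ih f (by simp at hf; omega) (fun c h => hw c (List.mem_cons_of_mem _ h)) (c :: cur)]
      simp

theorem split_nospace (cs : List Char) (h : ∀ c ∈ cs, c ≠ ' ') :
    PySem.Chars.splitOnMax cs [' '] 1 = [cs] := by
  rw [PySem.Chars.splitOnMax, if_neg (by norm_num), show ((1 : Int)).toNat = 1 from rfl,
      go_nospace cs (cs.length + 1) (by omega) h [] []]
  simp

theorem split_space (w t : List Char) (hw : ∀ c ∈ w, c ≠ ' ') :
    PySem.Chars.splitOnMax (w ++ ' ' :: t) [' '] 1 = [w, t] := by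
  rw [PySem.Chars.splitOnMax, if_neg (by norm_num), show ((1 : Int)).toNat = 1 from rfl,
      go_space w t _ (by simp only [List.length_append, List.length_cons]; omega) hw [] []]
  simp

-- drop past the first token and its space
theorem drop_word (u tt : List Char) :
    List.drop (u.length + 1) (u ++ ' ' :: tt) = tt := by
  rw [show u ++ ' ' :: tt = (u ++ [' ']) ++ tt by simp,
      show u.length + 1 = (u ++ [' ']).length by simp, List.drop_left]

theorem slice_word (u tt : List Char) :
    PySem.List.slice (u ++ ' ' :: tt) (some ((u.length : Int) + 1)) none = tt := by
  rw [PySem.List.slice_from _ (by omega), show (((u.length : Int)) + 1).toNat = u.length + 1 by omega,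
      drop_word]

theorem dw_head {p : Char → Bool} {l : List Char} {c : Char} {t : List Char}
    (h : List.dropWhile p l = c :: t) : p c = false := by
  induction l with
  | nil => simp at h
  | cons a l' ih =>
    rw [List.dropWhile_cons] at h
    by_cases hp : p a
    · exact ih (by simpa [hp] using h)
    · simp only [hp] at h
      simp only [Bool.not_eq_true] at hp
      cases h
      exact hp

-- the core equivalence, by the shape of the (stripped) label
theorem core0 (w : List Char) (hw : ' ' ∉ w) : parseLoopA w pyBrandsA = altCore w := by
  have hw' : ∀ c ∈ w, c ≠ ' ' := fun c hc he => hw (he ▸ hc)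
  have hf : ∀ b : List Char, PySem.Chars.startswith w (b ++ [' ']) = false := by
    intro b
    rw [Bool.eq_false_iff]
    intro h
    exact hw (pfx_space b w ((PySem.Chars.startswith_iff _ _).mp h))
  have hdw : w.dropWhile (· != ' ') = [] :=
    List.dropWhile_eq_nil_iff.mpr (fun x hx => by simpa using hw' x hx)
  have htw : w.takeWhile (· != ' ') = w := by
    have h := List.takeWhile_append_dropWhile (p := (· != ' ')) (l := w)
    rwa [hdw, List.append_nil] at h
  have hA : parseLoopA w pyBrandsA = (w, []) := by
    simp only [pyBrandsA, parseLoopA, hf, Bool.false_eq_true, if_false, split_nospace w hw']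
  have hB : altCore w = (w, []) := by
    simp [altCore, partSp, hdw]
  rw [hA, hB]

theorem core1 (w t : List Char) (hw : ' ' ∉ w) (ht : ' ' ∉ t) :
    parseLoopA (w ++ ' ' :: t) pyBrandsA = altCore (w ++ ' ' :: t) := by
  have hw' : ∀ c ∈ w, c ≠ ' ' := fun c hc he => hw (he ▸ hc)
  have ht' : ∀ c ∈ t, c ≠ ' ' := fun c hc he => ht (he ▸ hc)
  have hdwt : t.dropWhile (· != ' ') = [] :=
    List.dropWhile_eq_nil_iff.mpr (fun x hx => by simpa using ht' x hx)
  have h2f : ∀ u v : List Char, ' ' ∉ u →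
      PySem.Chars.startswith (w ++ ' ' :: t) (u ++ ' ' :: (v ++ [' '])) = false := by
    intro u v hu
    rw [Bool.eq_false_iff]
    intro h
    exact ht (pfx_space v t ((pfx2_iff u v w t hu hw).mp ((PySem.Chars.startswith_iff _ _).mp h)).2)
  have e1 : ("Alfa Romeo".toList ++ [' '] : List Char)
      = "Alfa".toList ++ ' ' :: ("Romeo".toList ++ [' ']) := by decide
  have e2 : ("Aston Martin".toList ++ [' '] : List Char)
      = "Aston".toList ++ ' ' :: ("Martin".toList ++ [' ']) := by decide
  have e3 : ("Land Rover".toList ++ [' '] : List Char)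
      = "Land".toList ++ ' ' :: ("Rover".toList ++ [' ']) := by decide
  have hA1 : PySem.Chars.startswith (w ++ ' ' :: t) ("Alfa Romeo".toList ++ [' ']) = false := by
    rw [e1]; exact h2f _ _ (by decide)
  have hA2 : PySem.Chars.startswith (w ++ ' ' :: t) ("Aston Martin".toList ++ [' ']) = false := by
    rw [e2]; exact h2f _ _ (by decide)
  have hA3 : PySem.Chars.startswith (w ++ ' ' :: t) ("Land Rover".toList ++ [' ']) = false := by
    rw [e3]; exact h2f _ _ (by decide)
  have hM : PySem.Chars.startswith (w ++ ' ' :: t) ("Mercedes-Benz".toList ++ [' ']) = true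
      ↔ w = "Mercedes-Benz".toList :=
    ((PySem.Chars.startswith_iff _ _).trans (pfx_iff _ _ _ (by decide) hw)).trans eq_comm
  have hR : PySem.Chars.startswith (w ++ ' ' :: t) ("Rolls-Royce".toList ++ [' ']) = true
      ↔ w = "Rolls-Royce".toList :=
    ((PySem.Chars.startswith_iff _ _).trans (pfx_iff _ _ _ (by decide) hw)).trans eq_comm
  by_cases hMw : w = "Mercedes-Benz".toList
  · subst hMw
    simp only [pyBrandsA, parseLoopA, hA1, hA2, hA3, Bool.false_eq_true, if_false]
    rw [if_pos (hM.mpr rfl), slice_word]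
    simp [altCore, partSp, oneTokenBrands]
  · by_cases hRw : w = "Rolls-Royce".toList
    · subst hRw
      have hMf : PySem.Chars.startswith ("Rolls-Royce".toList ++ ' ' :: t)
          ("Mercedes-Benz".toList ++ [' ']) = false := by
        rw [Bool.eq_false_iff]; intro h; exact hMw (hM.mp h)
      simp only [pyBrandsA, parseLoopA, hA1, hA2, hA3, hMf, Bool.false_eq_true, if_false]
      rw [if_pos (hR.mpr rfl), slice_word]
      simp [altCore, partSp, oneTokenBrands]
    · have hMf : PySem.Chars.startswith (w ++ ' ' :: t)
          ("Mercedes-Benz".toList ++ [' ']) = false := by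
        rw [Bool.eq_false_iff]; intro h; exact hMw (hM.mp h)
      have hRf : PySem.Chars.startswith (w ++ ' ' :: t)
          ("Rolls-Royce".toList ++ [' ']) = false := by
        rw [Bool.eq_false_iff]; intro h; exact hRw (hR.mp h)
      simp only [pyBrandsA, parseLoopA, hA1, hA2, hA3, hMf, hRf, Bool.false_eq_true, if_false,
        split_space w t hw']
      simp [altCore, partSp, tw_word _ _ hw, dw_word _ _ hw, hdwt, oneTokenBrands]
      rintro (rfl | rfl)
      · exact absurd (by decide) hMw
      · exact absurd (by decide) hRw

theorem core2 (w w2 t2 : List Char) (hw : ' ' ∉ w) (hw2 : ' ' ∉ w2) :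
    parseLoopA (w ++ ' ' :: (w2 ++ ' ' :: t2)) pyBrandsA = altCore (w ++ ' ' :: (w2 ++ ' ' :: t2)) := by
  have hw' : ∀ c ∈ w, c ≠ ' ' := fun c hc he => hw (he ▸ hc)
  have e1 : ("Alfa Romeo".toList ++ [' '] : List Char)
      = "Alfa".toList ++ ' ' :: ("Romeo".toList ++ [' ']) := by decide
  have e2 : ("Aston Martin".toList ++ [' '] : List Char)
      = "Aston".toList ++ ' ' :: ("Martin".toList ++ [' ']) := by decide
  have e3 : ("Land Rover".toList ++ [' '] : List Char)
      = "Land".toList ++ ' ' :: ("Rover".toList ++ [' ']) := by decide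
  have c1 : ("Alfa".toList ++ ' ' :: "Romeo".toList : List Char) = "Alfa Romeo".toList := by decide
  have c2 : ("Aston".toList ++ ' ' :: "Martin".toList : List Char) = "Aston Martin".toList := by decide
  have c3 : ("Land".toList ++ ' ' :: "Rover".toList : List Char) = "Land Rover".toList := by decide
  have h2 : ∀ u v : List Char, ' ' ∉ u → ' ' ∉ v →
      (PySem.Chars.startswith (w ++ ' ' :: (w2 ++ ' ' :: t2)) (u ++ ' ' :: (v ++ [' '])) = true
        ↔ (w = u ∧ w2 = v)) := by
    intro u v hu hv
    rw [PySem.Chars.startswith_iff, pfx2_iff u v w _ hu hw, pfx_iff v w2 t2 hv hw2]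
    exact and_congr eq_comm eq_comm
  have hA1 := (by rw [e1]; exact h2 _ _ (by decide) (by decide) :
    PySem.Chars.startswith (w ++ ' ' :: (w2 ++ ' ' :: t2)) ("Alfa Romeo".toList ++ [' ']) = true
      ↔ (w = "Alfa".toList ∧ w2 = "Romeo".toList))
  have hA2 := (by rw [e2]; exact h2 _ _ (by decide) (by decide) :
    PySem.Chars.startswith (w ++ ' ' :: (w2 ++ ' ' :: t2)) ("Aston Martin".toList ++ [' ']) = true
      ↔ (w = "Aston".toList ∧ w2 = "Martin".toList))
  have hA3 := (by rw [e3]; exact h2 _ _ (by decide) (by decide) :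
    PySem.Chars.startswith (w ++ ' ' :: (w2 ++ ' ' :: t2)) ("Land Rover".toList ++ [' ']) = true
      ↔ (w = "Land".toList ∧ w2 = "Rover".toList))
  have hM : PySem.Chars.startswith (w ++ ' ' :: (w2 ++ ' ' :: t2)) ("Mercedes-Benz".toList ++ [' ']) = true
      ↔ w = "Mercedes-Benz".toList :=
    ((PySem.Chars.startswith_iff _ _).trans (pfx_iff _ _ _ (by decide) hw)).trans eq_comm
  have hR : PySem.Chars.startswith (w ++ ' ' :: (w2 ++ ' ' :: t2)) ("Rolls-Royce".toList ++ [' ']) = true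
      ↔ w = "Rolls-Royce".toList :=
    ((PySem.Chars.startswith_iff _ _).trans (pfx_iff _ _ _ (by decide) hw)).trans eq_comm
  by_cases h1 : w = "Alfa".toList ∧ w2 = "Romeo".toList
  · obtain ⟨rfl, rfl⟩ := h1
    simp only [pyBrandsA, parseLoopA]
    rw [if_pos (hA1.mpr ⟨rfl, rfl⟩),
        show ("Alfa".toList ++ ' ' :: ("Romeo".toList ++ ' ' :: t2) : List Char)
          = "Alfa Romeo".toList ++ ' ' :: t2 from rfl, slice_word]
    simp [altCore, partSp, oneTokenBrands, twoWordBrands]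
  · by_cases hh2 : w = "Aston".toList ∧ w2 = "Martin".toList
    · obtain ⟨rfl, rfl⟩ := hh2
      have hA1f : PySem.Chars.startswith ("Aston".toList ++ ' ' :: ("Martin".toList ++ ' ' :: t2))
          ("Alfa Romeo".toList ++ [' ']) = false := by
        rw [Bool.eq_false_iff]; intro h; exact h1 (hA1.mp h)
      simp only [pyBrandsA, parseLoopA, hA1f, Bool.false_eq_true, if_false]
      rw [if_pos (hA2.mpr ⟨rfl, rfl⟩),
          show ("Aston".toList ++ ' ' :: ("Martin".toList ++ ' ' :: t2) : List Char)
            = "Aston Martin".toList ++ ' ' :: t2 from rfl, slice_word]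
      simp [altCore, partSp, oneTokenBrands, twoWordBrands]
    · by_cases h3 : w = "Land".toList ∧ w2 = "Rover".toList
      · obtain ⟨rfl, rfl⟩ := h3
        have hA1f : PySem.Chars.startswith ("Land".toList ++ ' ' :: ("Rover".toList ++ ' ' :: t2))
            ("Alfa Romeo".toList ++ [' ']) = false := by
          rw [Bool.eq_false_iff]; intro h; exact h1 (hA1.mp h)
        have hA2f : PySem.Chars.startswith ("Land".toList ++ ' ' :: ("Rover".toList ++ ' ' :: t2))
            ("Aston Martin".toList ++ [' ']) = false := by
          rw [Bool.eq_false_iff]; intro h; exact hh2 (hA2.mp h)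
        simp only [pyBrandsA, parseLoopA, hA1f, hA2f, Bool.false_eq_true, if_false]
        rw [if_pos (hA3.mpr ⟨rfl, rfl⟩),
            show ("Land".toList ++ ' ' :: ("Rover".toList ++ ' ' :: t2) : List Char)
              = "Land Rover".toList ++ ' ' :: t2 from rfl, slice_word]
        simp [altCore, partSp, oneTokenBrands, twoWordBrands]
      · have hA1f : PySem.Chars.startswith (w ++ ' ' :: (w2 ++ ' ' :: t2))
            ("Alfa Romeo".toList ++ [' ']) = false := by
          rw [Bool.eq_false_iff]; intro h; exact h1 (hA1.mp h)
        have hA2f : PySem.Chars.startswith (w ++ ' ' :: (w2 ++ ' ' :: t2))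
            ("Aston Martin".toList ++ [' ']) = false := by
          rw [Bool.eq_false_iff]; intro h; exact hh2 (hA2.mp h)
        have hA3f : PySem.Chars.startswith (w ++ ' ' :: (w2 ++ ' ' :: t2))
            ("Land Rover".toList ++ [' ']) = false := by
          rw [Bool.eq_false_iff]; intro h; exact h3 (hA3.mp h)
        by_cases hMw : w = "Mercedes-Benz".toList
        · subst hMw
          simp only [pyBrandsA, parseLoopA, hA1f, hA2f, hA3f, Bool.false_eq_true, if_false]
          rw [if_pos (hM.mpr rfl), slice_word]
          simp [altCore, partSp, oneTokenBrands]
        · by_cases hRw : w = "Rolls-Royce".toList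
          · subst hRw
            have hMf : PySem.Chars.startswith ("Rolls-Royce".toList ++ ' ' :: (w2 ++ ' ' :: t2))
                ("Mercedes-Benz".toList ++ [' ']) = false := by
              rw [Bool.eq_false_iff]; intro h; exact hMw (hM.mp h)
            simp only [pyBrandsA, parseLoopA, hA1f, hA2f, hA3f, hMf, Bool.false_eq_true, if_false]
            rw [if_pos (hR.mpr rfl), slice_word]
            simp [altCore, partSp, oneTokenBrands]
          · have hMf : PySem.Chars.startswith (w ++ ' ' :: (w2 ++ ' ' :: t2))
                ("Mercedes-Benz".toList ++ [' ']) = false := by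
              rw [Bool.eq_false_iff]; intro h; exact hMw (hM.mp h)
            have hRf : PySem.Chars.startswith (w ++ ' ' :: (w2 ++ ' ' :: t2))
                ("Rolls-Royce".toList ++ [' ']) = false := by
              rw [Bool.eq_false_iff]; intro h; exact hRw (hR.mp h)
            have hnm : (w ++ ' ' :: w2 : List Char) ∉ twoWordBrands := by
              intro hmem
              simp only [twoWordBrands, List.mem_cons, List.not_mem_nil,
                or_false] at hmem
              rcases hmem with h | h | h
              · exact h1 ((word_inj w _ w2 _ hw (by decide)).mp (h.trans c1.symm))
              · exact hh2 ((word_inj w _ w2 _ hw (by decide)).mp (h.trans c2.symm))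
              · exact h3 ((word_inj w _ w2 _ hw (by decide)).mp (h.trans c3.symm))
            simp only [pyBrandsA, parseLoopA, hA1f, hA2f, hA3f, hMf, hRf, Bool.false_eq_true,
              if_false, split_space w _ hw']
            simp [altCore, partSp, tw_word _ _ hw, dw_word _ _ hw, tw_word _ _ hw2,
              dw_word _ _ hw2, oneTokenBrands, hnm]
            rintro (rfl | rfl)
            · exact absurd (by decide) hMw
            · exact absurd (by decide) hRw

theorem coreEq (cs : List Char) : parseLoopA cs pyBrandsA = altCore cs := by
  have hs := List.takeWhile_append_dropWhile (p := (· != ' ')) (l := cs)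
  have hwns : ' ' ∉ cs.takeWhile (· != ' ') := by
    intro h
    simpa using List.mem_takeWhile_imp h
  cases hr : cs.dropWhile (· != ' ') with
  | nil =>
    have hcs : cs = cs.takeWhile (· != ' ') := by
      conv_lhs => rw [← hs]
      rw [hr, List.append_nil]
    conv_lhs => rw [hcs]
    conv_rhs => rw [hcs]
    exact core0 _ hwns
  | cons c t =>
    have hc : (c != ' ') = false := dw_head (p := (· != ' ')) hr
    have hc' : c = ' ' := by simpa using hc
    subst hc'
    have hcs : cs = cs.takeWhile (· != ' ') ++ ' ' :: t := by
      conv_lhs => rw [← hs]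
      rw [hr]
    have hs2 := List.takeWhile_append_dropWhile (p := (· != ' ')) (l := t)
    have hw2ns : ' ' ∉ t.takeWhile (· != ' ') := by
      intro h
      simpa using List.mem_takeWhile_imp h
    cases hr2 : t.dropWhile (· != ' ') with
    | nil =>
      have ht : t = t.takeWhile (· != ' ') := by
        conv_lhs => rw [← hs2]
        rw [hr2, List.append_nil]
      conv_lhs => rw [hcs, ht]
      conv_rhs => rw [hcs, ht]
      exact core1 _ _ hwns hw2ns
    | cons c2 t2 =>
      have hc2 : (c2 != ' ') = false := dw_head (p := (· != ' ')) hr2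
      have hc2' : c2 = ' ' := by simpa using hc2
      subst hc2'
      have ht : t = t.takeWhile (· != ' ') ++ ' ' :: t2 := by
        conv_lhs => rw [← hs2]
        rw [hr2]
      conv_lhs => rw [hcs, ht]
      conv_rhs => rw [hcs, ht]
      exact core2 _ _ _ hwns hw2ns

-- ===== VERDICT (by name: the statement is the Claim_ definition above) =====
theorem parse_brand_model_py_spec : Claim_equal_parse_brand_model_py := by
  intro label _
  unfold Spec_parse_brand_model_py parse_brand_model_py parse_brand_model_py_alt
  exact congrArg (fun p => (String.ofList p.1, String.ofList p.2))
    (coreEq (PySem.Chars.strip label.toList))
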